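-- pv_equiv track=rewrite | github.com/kevinkang-Globe/esp-gmf | gmf_elements/gmf_io/mk_flash_embed_tone.py | gen_h_file
-- ===== SOURCE A (Python) =====
-- def sanitize_filename(filename):
--     return filename.replace('-', '_')
--
-- def gen_h_file(file_dic):
--     h_file = '#pragma once\r\n\r\n'
--     h_file += '/**\n * @brief Structure for embedding tone information\n */\n'
--     h_file += 'typedef struct {\r\n    const uint8_t * address; /**< Pointer to the embedded tone data */\r\n    int size; /**< Size of the tone data in bytes */\r\n} esp_embed_tone_t;\r\n\r\n'
--     cmake_file = 'set(COMPONENT_EMBED_TXTFILES'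
--
--     enum_file = '\n/**\n * @brief Enumeration for tone URLs\n */\n'
--     enum_file += 'enum esp_embed_tone_index {'
--     struct_file = '/**\n * @brief Array of tone URLs\n */\n'
--     struct_file += 'const char * esp_embed_tone_url[] = {'
--     next_h_file = '/**\n * @brief Array of embedded tone information, use in `esp_gmf_io_embed_flash_set_context`\n */\n'
--     next_h_file += 'esp_embed_tone_t g_esp_embed_tone[] = {'
--     file_num = 0
--
--     for key in file_dic:
--         cmake_file += ' ' + key
--         sanitized_key = sanitize_filename(key.replace('.', '_'))
--         h_file += '/**\n * @brief External reference to embedded tone data\n */\n'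
--         h_file += 'extern const uint8_t ' + sanitized_key + "[] asm(\"_binary_" + sanitized_key + "_start\");\r\n\r\n"
--         str_file_num = str(file_num)
--         str_file_size = str(file_dic[key])
--         next_h_file += '\n    [' + str_file_num + '] = {\n        .address = ' + sanitized_key + ', /**< Tone data address */\n        .size    = '+ str_file_size +', /**< Tone data size */\n    },'
--         file_num += 1
--
--         enum_file += '\n    ESP_EMBED_TONE_' + sanitized_key.upper() + ' = ' + str_file_num + ','
--         result = sanitized_key.rfind('_')
--         list_key = list(sanitized_key)
--         list_key[result] = '.'
--         sanitized_key = ''.join(list_key)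
--         struct_file += "\n    \"" + 'embed://tone/' + str_file_num + '_' + sanitized_key + "\","
--
--     enum_file += '\n    ESP_EMBED_TONE_URL_MAX = ' + str(file_num) + ''
--     next_h_file += '\n};\n';
--     cmake_file += ')'
--     enum_file += '\n};\n\n';
--     struct_file += '\n};\n';
--     h_file += next_h_file
--     h_file += enum_file
--     h_file += struct_file
--     return h_file, cmake_file
-- ===== SOURCE B (Python) =====
-- _H_PREFIX = ('#pragma once\r\n\r\n'
--              '/**\n * @brief Structure for embedding tone information\n */\n'
--              'typedef struct {\r\n    const uint8_t * address; /**< Pointer to the embedded tone data */\r\n    int size; /**< Size of the tone data in bytes */\r\n} esp_embed_tone_t;\r\n\r\n')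
-- _NEXT_HDR = ('/**\n * @brief Array of embedded tone information, use in `esp_gmf_io_embed_flash_set_context`\n */\n'
--              'esp_embed_tone_t g_esp_embed_tone[] = {')
-- _ENUM_HDR = ('\n/**\n * @brief Enumeration for tone URLs\n */\n'
--              'enum esp_embed_tone_index {')
-- _STRUCT_HDR = ('/**\n * @brief Array of tone URLs\n */\n'
--                'const char * esp_embed_tone_url[] = {')
--
--
-- def gen_h_file(file_dic):
--     # One pass: build a record per tone, then emit each section separately.
--     recs = []
--     for i, (key, size) in enumerate(file_dic.items()):
--         sk = key.replace('.', '_').replace('-', '_')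
--         p = sk.rfind('_')
--         url = sk[:p] + '.' + sk[p + 1:] if p >= 0 else sk[:-1] + '.'
--         recs.append((key, sk, str(i), str(size), url))
--
--     externs = ''.join('/**\n * @brief External reference to embedded tone data\n */\n'
--                       'extern const uint8_t ' + sk + '[] asm("_binary_' + sk + '_start");\r\n\r\n'
--                       for _, sk, _, _, _ in recs)
--     entries = ''.join('\n    [' + n + '] = {\n        .address = ' + sk +
--                       ', /**< Tone data address */\n        .size    = ' + sz +
--                       ', /**< Tone data size */\n    },'
--                       for _, sk, n, sz, _ in recs)
--     enums = ''.join('\n    ESP_EMBED_TONE_' + sk.upper() + ' = ' + n + ','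
--                     for _, sk, n, _, _ in recs)
--     urls = ''.join('\n    "embed://tone/' + n + '_' + url + '",'
--                    for _, _, n, _, url in recs)
--
--     h_file = (_H_PREFIX + externs
--               + _NEXT_HDR + entries + '\n};\n'
--               + _ENUM_HDR + enums + '\n    ESP_EMBED_TONE_URL_MAX = ' + str(len(recs)) + '\n};\n\n'
--               + _STRUCT_HDR + urls + '\n};\n')
--     cmake_file = 'set(COMPONENT_EMBED_TXTFILES' + ''.join(' ' + k for k, _, _, _, _ in recs) + ')'
--     return h_file, cmake_file
-- ===== Notes on version B (the rewrite author's own statement) =====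
-- stated objective: alternative
-- what changed: A's single interleaved loop mutating six string accumulators is replaced by one pass that builds a record table (key, sanitized key, index, size, url) and then emits each of the five output sections by its own join over that table.
import Mathlib
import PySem

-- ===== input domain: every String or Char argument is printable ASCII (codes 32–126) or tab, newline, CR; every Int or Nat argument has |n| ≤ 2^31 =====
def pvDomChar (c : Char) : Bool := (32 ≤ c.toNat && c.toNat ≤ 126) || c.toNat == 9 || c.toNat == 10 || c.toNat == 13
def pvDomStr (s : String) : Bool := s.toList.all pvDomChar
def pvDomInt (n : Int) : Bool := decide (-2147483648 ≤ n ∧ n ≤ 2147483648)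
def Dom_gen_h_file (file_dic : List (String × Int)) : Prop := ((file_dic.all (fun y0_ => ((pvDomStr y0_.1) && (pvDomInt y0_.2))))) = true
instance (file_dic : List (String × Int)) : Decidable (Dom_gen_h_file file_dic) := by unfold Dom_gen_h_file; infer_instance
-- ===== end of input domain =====

-- B replaces A's single interleaved accumulator loop by one pass that builds a record table and
-- five independent per-section joins over it (objective: alternative decomposition, same cost).
-- The dict argument is modelled as an association list; Pre_ excludes empty-string keys (A raises
-- IndexError there) and duplicate keys (which no Python dict produces).

-- ===== PORT A =====
def sanitize_filename (filename : String) : String := PySem.Str.replace filename "-" "_"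

-- the body of A's 'for key in file_dic' loop; state = (h_file, cmake_file, enum_file, struct_file, next_h_file, file_num)
def pvStepA (file_dic : List (String × Int)) (st : String × String × String × String × String × Int)
    (kv : String × Int) : String × String × String × String × String × Int :=
  match st with
  | (h_file, cmake_file, enum_file, struct_file, next_h_file, file_num) =>
    let cmake_file := cmake_file ++ " " ++ kv.1
    let sanitized_key := sanitize_filename (PySem.Str.replace kv.1 "." "_")
    let h_file := h_file ++ "/**\n * @brief External reference to embedded tone data\n */\n"
    let h_file := h_file ++ "extern const uint8_t " ++ sanitized_key ++ "[] asm(\"_binary_" ++ sanitized_key ++ "_start\");\r\n\r\n"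
    let str_file_num := PySem.Int.toStr file_num
    -- file_dic[key]: first-match lookup in the association list (the key is always present)
    let str_file_size := PySem.Int.toStr ((List.lookup kv.1 file_dic).getD 0)
    let next_h_file := next_h_file ++ "\n    [" ++ str_file_num ++ "] = {\n        .address = " ++ sanitized_key ++ ", /**< Tone data address */\n        .size    = " ++ str_file_size ++ ", /**< Tone data size */\n    },"
    let file_num := file_num + 1
    let enum_file := enum_file ++ "\n    ESP_EMBED_TONE_" ++ PySem.Str.upper sanitized_key ++ " = " ++ str_file_num ++ ","
    let result := PySem.Str.rfind sanitized_key "_"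
    let list_key := sanitized_key.toList
    -- list_key[result] = '.' — IndexError when sanitized_key is empty (excluded by Pre_); pySetD is the total form
    let list_key := PySem.List.pySetD list_key result '.'
    let sanitized_key := String.ofList list_key   -- ''.join(list_key)
    let struct_file := struct_file ++ "\n    \"" ++ "embed://tone/" ++ str_file_num ++ "_" ++ sanitized_key ++ "\","
    (h_file, cmake_file, enum_file, struct_file, next_h_file, file_num)

def gen_h_file (file_dic : List (String × Int)) : String × String :=
  let h_file := "#pragma once\r\n\r\n"
  let h_file := h_file ++ "/**\n * @brief Structure for embedding tone information\n */\n"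
  let h_file := h_file ++ "typedef struct {\r\n    const uint8_t * address; /**< Pointer to the embedded tone data */\r\n    int size; /**< Size of the tone data in bytes */\r\n} esp_embed_tone_t;\r\n\r\n"
  let cmake_file := "set(COMPONENT_EMBED_TXTFILES"
  let enum_file := "\n/**\n * @brief Enumeration for tone URLs\n */\n"
  let enum_file := enum_file ++ "enum esp_embed_tone_index {"
  let struct_file := "/**\n * @brief Array of tone URLs\n */\n"
  let struct_file := struct_file ++ "const char * esp_embed_tone_url[] = {"
  let next_h_file := "/**\n * @brief Array of embedded tone information, use in `esp_gmf_io_embed_flash_set_context`\n */\n"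
  let next_h_file := next_h_file ++ "esp_embed_tone_t g_esp_embed_tone[] = {"
  match file_dic.foldl (pvStepA file_dic) (h_file, cmake_file, enum_file, struct_file, next_h_file, 0) with
  | (h_file, cmake_file, enum_file, struct_file, next_h_file, file_num) =>
    let enum_file := enum_file ++ "\n    ESP_EMBED_TONE_URL_MAX = " ++ PySem.Int.toStr file_num
    let next_h_file := next_h_file ++ "\n};\n"
    let cmake_file := cmake_file ++ ")"
    let enum_file := enum_file ++ "\n};\n\n"
    let struct_file := struct_file ++ "\n};\n"
    (h_file ++ next_h_file ++ enum_file ++ struct_file, cmake_file)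

-- ===== PORT B =====
structure PvRec where
  key : String
  sk : String
  num : String
  size : String
  url : String
deriving Repr, DecidableEq

-- ''.join(...): concatenation of the pieces in order (exact for the empty separator)
def pvConcat : List String → String
  | [] => ""
  | s :: rest => s ++ pvConcat rest

-- the record table: one pass over the items with the running index (Python's enumerate)
def pvRecs : List (String × Int) → Int → List PvRec
  | [], _ => []
  | kv :: rest, i =>
    let sk := PySem.Str.replace (PySem.Str.replace kv.1 "." "_") "-" "_"
    let p := PySem.Str.rfind sk "_"
    let url := if 0 ≤ p then
        PySem.Str.slice sk none (some p) ++ "." ++ PySem.Str.slice sk (some (p + 1)) none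
      else
        PySem.Str.slice sk none (some (-1)) ++ "."
    ⟨kv.1, sk, PySem.Int.toStr i, PySem.Int.toStr kv.2, url⟩ :: pvRecs rest (i + 1)

def pvExt (r : PvRec) : String :=
  "/**\n * @brief External reference to embedded tone data\n */\nextern const uint8_t " ++ r.sk ++ "[] asm(\"_binary_" ++ r.sk ++ "_start\");\r\n\r\n"
def pvEntry (r : PvRec) : String :=
  "\n    [" ++ r.num ++ "] = {\n        .address = " ++ r.sk ++ ", /**< Tone data address */\n        .size    = " ++ r.size ++ ", /**< Tone data size */\n    },"
def pvEnum (r : PvRec) : String :=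
  "\n    ESP_EMBED_TONE_" ++ PySem.Str.upper r.sk ++ " = " ++ r.num ++ ","
def pvUrl (r : PvRec) : String :=
  "\n    \"embed://tone/" ++ r.num ++ "_" ++ r.url ++ "\","
def pvCm (r : PvRec) : String := " " ++ r.key

def gen_h_file_alt (file_dic : List (String × Int)) : String × String :=
  let recs := pvRecs file_dic 0
  let externs := pvConcat (recs.map pvExt)
  let entries := pvConcat (recs.map pvEntry)
  let enums := pvConcat (recs.map pvEnum)
  let urls := pvConcat (recs.map pvUrl)
  let h_file :=
    "#pragma once\r\n\r\n/**\n * @brief Structure for embedding tone information\n */\ntypedef struct {\r\n    const uint8_t * address; /**< Pointer to the embedded tone data */\r\n    int size; /**< Size of the tone data in bytes */\r\n} esp_embed_tone_t;\r\n\r\n"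
    ++ externs
    ++ "/**\n * @brief Array of embedded tone information, use in `esp_gmf_io_embed_flash_set_context`\n */\nesp_embed_tone_t g_esp_embed_tone[] = {"
    ++ entries ++ "\n};\n"
    ++ "\n/**\n * @brief Enumeration for tone URLs\n */\nenum esp_embed_tone_index {"
    ++ enums ++ "\n    ESP_EMBED_TONE_URL_MAX = " ++ PySem.Int.toStr (recs.length : Int) ++ "\n};\n\n"
    ++ "/**\n * @brief Array of tone URLs\n */\nconst char * esp_embed_tone_url[] = {"
    ++ urls ++ "\n};\n"
  let cmake_file := "set(COMPONENT_EMBED_TXTFILES" ++ pvConcat (recs.map pvCm) ++ ")"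
  (h_file, cmake_file)

-- ===== PRECONDITION & SPEC =====
-- Pre_ excludes empty-string keys (A raises IndexError on them) and duplicate keys (an
-- association list with duplicate keys does not represent a Python dict, whose construction
-- collapses duplicates before A ever iterates).
def Pre_gen_h_file (file_dic : List (String × Int)) : Prop :=
  (file_dic.map Prod.fst).Nodup ∧ ∀ p ∈ file_dic, p.1 ≠ ""
instance (file_dic : List (String × Int)) : Decidable (Pre_gen_h_file file_dic) := by
  unfold Pre_gen_h_file; infer_instance

def pvWitness_gen_h_file : (List (String × Int)) := [("a.mp3", 10), ("b-c.mp3", 2)]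

def Spec_gen_h_file (file_dic : List (String × Int)) (out : String × String) : Prop := out = gen_h_file_alt file_dic
instance (file_dic : List (String × Int)) (out : String × String) : Decidable (Spec_gen_h_file file_dic out) := by
  unfold Spec_gen_h_file; infer_instance

-- ===== CLAIM (what is proved, stated in full; the proofs are below) =====
def Claim_equal_gen_h_file : Prop := ∀ (file_dic : List (String × Int)), Dom_gen_h_file file_dic → Pre_gen_h_file file_dic → Spec_gen_h_file file_dic (gen_h_file file_dic)

-- ===== LEMMAS AND PROOFS =====

-- merging two adjacent string literals inside a right-nested append chain
theorem pvGlue {a b c : String} (h : a ++ b = c) (x : String) : a ++ (b ++ x) = c ++ x := by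
  rw [← String.append_assoc, h]

-- first-match lookup returns the pair's own value when the keys are nodup
theorem pvLookup_nodup : ∀ (d : List (String × Int)), (d.map Prod.fst).Nodup →
    ∀ {k : String} {v : Int}, (k, v) ∈ d → List.lookup k d = some v := by
  intro d
  induction d with
  | nil => intro _ k v h; cases h
  | cons hd tl ih =>
    intro hnd k v hmem
    simp only [List.map_cons, List.nodup_cons] at hnd
    rcases List.mem_cons.mp hmem with heq | htl
    · cases heq
      simp [List.lookup]
    · have hk : k ≠ hd.1 := by
        intro he
        exact hnd.1 (he ▸ (List.mem_map.mpr ⟨(k, v), htl, rfl⟩))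
      simp only [List.lookup]
      have hb : (k == hd.1) = false := by
        simpa using hk
      rw [hb]
      exact ih hnd.2 htl

theorem pvReplaceGo_ne_nil (old new : List Char) (hnew : new ≠ []) :
    ∀ (fuel : Nat) (l acc : List Char), (l ≠ [] ∨ acc ≠ []) → PySem.Chars.replace.go old new fuel l acc ≠ [] := by
  intro fuel
  induction fuel with
  | zero =>
    intro l acc h
    simp only [PySem.Chars.replace.go]
    rcases h with h | h <;> simp [h]
  | succ n ih =>
    intro l acc h
    match l with
    | [] =>
      simp only [PySem.Chars.replace.go]
      rcases h with h | h
      · exact absurd rfl h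
      · simpa using h
    | c :: t =>
      simp only [PySem.Chars.replace.go]
      split
      · exact ih _ _ (Or.inr (by simp [hnew]))
      · exact ih _ _ (Or.inr (by simp))

theorem pvReplace_ne_nil (s old new : List Char) (hnew : new ≠ []) (hs : s ≠ []) :
    PySem.Chars.replace s old new ≠ [] := by
  unfold PySem.Chars.replace
  split
  · simp [hnew]
  · exact pvReplaceGo_ne_nil old new hnew _ _ _ (Or.inl hs)

theorem pvRfindGo_cases (s sub : List Char) (hsub : sub ≠ []) :
    ∀ (k : Nat), PySem.Chars.rfind.go s sub k = -1 ∨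
      ∃ j : Nat, j ≤ k ∧ PySem.Chars.rfind.go s sub k = (j : Int) ∧ j < s.length := by
  have pref : ∀ (j : Nat), sub <+: List.drop j s → j < s.length := by
    intro j hp
    by_contra hge
    rw [List.drop_eq_nil_of_le (by omega)] at hp
    exact hsub (List.prefix_nil.mp hp)
  intro k
  induction k with
  | zero =>
    simp only [PySem.Chars.rfind.go]
    split
    next hp => right; exact ⟨0, le_refl 0, rfl, pref 0 (by simpa using hp)⟩
    next => left; rfl
  | succ n ih =>
    simp only [PySem.Chars.rfind.go]
    split
    next hp => right; exact ⟨n + 1, le_refl _, by push_cast; ring_nf, pref (n+1) (by simpa using hp)⟩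
    next =>
      rcases ih with h | ⟨j, hj, he, hl⟩
      · left; exact h
      · right; exact ⟨j, Nat.le_succ_of_le hj, he, hl⟩

theorem pvRfind_cases (s sub : List Char) (hsub : sub ≠ []) :
    PySem.Chars.rfind s sub = -1 ∨
      ∃ j : Nat, PySem.Chars.rfind s sub = (j : Int) ∧ j < s.length := by
  unfold PySem.Chars.rfind
  rcases pvRfindGo_cases s sub hsub s.length with h | ⟨j, _, he, hl⟩
  · left; exact h
  · right; exact ⟨j, he, hl⟩

theorem pvUrl_eq (sk : String) (h : sk.toList ≠ []) :
    String.ofList (PySem.List.pySetD sk.toList (PySem.Str.rfind sk "_") '.') =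
      (if 0 ≤ PySem.Str.rfind sk "_" then
        PySem.Str.slice sk none (some (PySem.Str.rfind sk "_")) ++ "." ++ PySem.Str.slice sk (some (PySem.Str.rfind sk "_" + 1)) none
      else
        PySem.Str.slice sk none (some (-1)) ++ ".") := by
  have hlen : 1 ≤ sk.toList.length := by
    cases hcs : sk.toList with
    | nil => exact absurd hcs h
    | cons a t => simp
  have hr : PySem.Str.rfind sk "_" = PySem.Chars.rfind sk.toList ['_'] := by
    have hb : ("_" : String).toList = ['_'] := by decide
    rw [PySem.Str.rfind_eq, hb]
  rcases pvRfind_cases sk.toList ['_'] (by simp) with hneg | ⟨j, hje, hjl⟩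
  · rw [hr, hneg]
    rw [if_neg (by norm_num)]
    apply String.ext
    simp only [String.toList_ofList, String.toList_append, PySem.Str.toList_slice]
    have hset : PySem.List.pySetD sk.toList (-1) '.' = sk.toList.set (sk.toList.length - 1) '.' := by
      simp only [PySem.List.pySetD, PySem.List.pySet?, PySem.List.pyIdx?]
      rw [if_neg (by norm_num), if_pos (by omega)]
      simp
    rw [hset, List.set_eq_take_append_cons_drop, if_pos (by omega)]
    have hslice : PySem.Chars.slice sk.toList none (some (-1)) = sk.toList.take (sk.toList.length - 1) := by
      simp only [PySem.Chars.slice, PySem.List.slice, PySem.List.clampIdx]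
      rw [if_pos (by norm_num), if_neg (by omega)]
      simp only [List.drop_zero]
      congr 1
      omega
    rw [hslice]
    rw [List.drop_eq_nil_of_le (by omega)]
    simp [String.toList]
    decide
  · rw [hr, hje]
    rw [if_pos (by positivity)]
    apply String.ext
    simp only [String.toList_ofList, String.toList_append, PySem.Str.toList_slice]
    have hset : PySem.List.pySetD sk.toList (j : Int) '.' = sk.toList.set j '.' := by
      simp only [PySem.List.pySetD, PySem.List.pySet?, PySem.List.pyIdx?]
      rw [if_pos (by positivity), if_pos (by exact_mod_cast hjl)]
      simp
    rw [hset, List.set_eq_take_append_cons_drop, if_pos hjl]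
    have h1 : PySem.Chars.slice sk.toList none (some (j : Int)) = sk.toList.take j := by
      have h1' := PySem.List.slice_to (b := (j : Int)) sk.toList (by positivity)
      simp only [PySem.Chars.slice]
      rw [h1']
      simp
    have h2 : PySem.Chars.slice sk.toList (some ((j : Int) + 1)) none = sk.toList.drop (j + 1) := by
      have h2' := PySem.List.slice_from (a := (j : Int) + 1) sk.toList (by positivity)
      simp only [PySem.Chars.slice]
      rw [h2']
      have he : ((j : Int) + 1).toNat = j + 1 := by omega
      rw [he]
    rw [h1, h2]
    have hdot : (".".toList : List Char) = ['.'] := by decide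
    rw [hdot]
    simp

theorem pvRecs_length : ∀ (l : List (String × Int)) (i : Int), (pvRecs l i).length = l.length := by
  intro l
  induction l with
  | nil => intro i; simp [pvRecs]
  | cons hd tl ih => intro i; simp [pvRecs, ih]

-- literal-merging facts used to align the two decompositions
set_option maxRecDepth 8192 in
theorem pvM_ext : "/**\n * @brief External reference to embedded tone data\n */\n" ++ "extern const uint8_t " = "/**\n * @brief External reference to embedded tone data\n */\nextern const uint8_t " := by decide
theorem pvM_url : "\n    \"" ++ "embed://tone/" = "\n    \"embed://tone/" := by decide
set_option maxRecDepth 8192 in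
theorem pvM_h1 : "#pragma once\r\n\r\n" ++ "/**\n * @brief Structure for embedding tone information\n */\n" = "#pragma once\r\n\r\n/**\n * @brief Structure for embedding tone information\n */\n" := by decide
set_option maxRecDepth 8192 in
theorem pvM_h2 : "#pragma once\r\n\r\n/**\n * @brief Structure for embedding tone information\n */\n" ++ "typedef struct {\r\n    const uint8_t * address; /**< Pointer to the embedded tone data */\r\n    int size; /**< Size of the tone data in bytes */\r\n} esp_embed_tone_t;\r\n\r\n" = "#pragma once\r\n\r\n/**\n * @brief Structure for embedding tone information\n */\ntypedef struct {\r\n    const uint8_t * address; /**< Pointer to the embedded tone data */\r\n    int size; /**< Size of the tone data in bytes */\r\n} esp_embed_tone_t;\r\n\r\n" := by decide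
set_option maxRecDepth 8192 in
theorem pvM_enum : "\n/**\n * @brief Enumeration for tone URLs\n */\n" ++ "enum esp_embed_tone_index {" = "\n/**\n * @brief Enumeration for tone URLs\n */\nenum esp_embed_tone_index {" := by decide
set_option maxRecDepth 8192 in
theorem pvM_struct : "/**\n * @brief Array of tone URLs\n */\n" ++ "const char * esp_embed_tone_url[] = {" = "/**\n * @brief Array of tone URLs\n */\nconst char * esp_embed_tone_url[] = {" := by decide
set_option maxRecDepth 8192 in
theorem pvM_next : "/**\n * @brief Array of embedded tone information, use in `esp_gmf_io_embed_flash_set_context`\n */\n" ++ "esp_embed_tone_t g_esp_embed_tone[] = {" = "/**\n * @brief Array of embedded tone information, use in `esp_gmf_io_embed_flash_set_context`\n */\nesp_embed_tone_t g_esp_embed_tone[] = {" := by decide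

-- the loop invariant: A's fold extends each accumulator by the corresponding per-record section
theorem pvLoop (d : List (String × Int)) :
    ∀ (l : List (String × Int)), (∀ p ∈ l, p.1 ≠ "" ∧ List.lookup p.1 d = some p.2) →
    ∀ (h cm en st nh : String) (n : Int),
    List.foldl (pvStepA d) (h, cm, en, st, nh, n) l =
      (h ++ pvConcat ((pvRecs l n).map pvExt),
       cm ++ pvConcat ((pvRecs l n).map pvCm),
       en ++ pvConcat ((pvRecs l n).map pvEnum),
       st ++ pvConcat ((pvRecs l n).map pvUrl),
       nh ++ pvConcat ((pvRecs l n).map pvEntry),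
       n + l.length) := by
  intro l
  induction l with
  | nil =>
    intro _ h cm en st nh n
    simp [pvRecs, pvConcat]
  | cons kv l ih =>
    intro hl h cm en st nh n
    obtain ⟨k, v⟩ := kv
    have hk : k ≠ "" := (hl (k, v) (by simp)).1
    have hv : List.lookup k d = some v := (hl (k, v) (by simp)).2
    have hsk : (PySem.Str.replace (PySem.Str.replace k "." "_") "-" "_").toList ≠ [] := by
      simp only [PySem.Str.toList_replace]
      apply pvReplace_ne_nil _ _ _ (by decide)
      apply pvReplace_ne_nil _ _ _ (by decide)
      intro h0
      exact hk (String.ext (by simpa using h0))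
    simp only [List.foldl_cons, pvStepA, sanitize_filename]
    rw [ih (fun p hp => hl p (List.mem_cons_of_mem _ hp))]
    simp only [pvRecs, List.map_cons, pvConcat, hv, Option.getD_some]
    rw [pvUrl_eq _ hsk]
    simp only [pvExt, pvCm, pvEnum, pvUrl, pvEntry, Prod.mk.injEq]
    refine ⟨?_, ?_, ?_, ?_, ?_, by simp only [List.length_cons]; push_cast; ring⟩
    all_goals simp only [String.append_assoc, pvGlue pvM_ext, pvGlue pvM_url]

-- ===== VERDICT (by name: the statement is the Claim_ definition above) =====
theorem gen_h_file_spec : Claim_equal_gen_h_file := by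
  intro d hdom hpre
  unfold Spec_gen_h_file
  have hl : ∀ p ∈ d, p.1 ≠ "" ∧ List.lookup p.1 d = some p.2 := by
    intro p hp
    refine ⟨hpre.2 p hp, ?_⟩
    obtain ⟨k, v⟩ := p
    exact pvLookup_nodup d hpre.1 hp
  simp only [gen_h_file, gen_h_file_alt]
  rw [pvLoop d d hl]
  simp only [pvRecs_length, zero_add, Prod.mk.injEq]
  refine ⟨?_, ?_⟩
  all_goals simp only [String.append_assoc, pvGlue pvM_h1, pvGlue pvM_h2, pvGlue pvM_next, pvGlue pvM_enum, pvGlue pvM_struct]
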